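-- pv_equiv track=rewrite | github.com/breadgineer/berkeleyChallenge | cs61a/homeworks/hw4/Q2.py | remove_odd_indices
-- ===== SOURCE A (Python) =====
-- def remove_odd_indices(lst, odd):
--     """Remove elements of lst that have odd indices. Use recursion!
--
--     >>> s = [1, 2, 3, 4]
--     >>> t = remove_odd_indices(s, True)
--     >>> s
--     [1, 2, 3, 4]
--     >>> t
--     [1, 3]
--     >>> l = [5, 6, 7, 8]
--     >>> m = remove_odd_indices(l, False)
--     >>> m
--     [6, 8]
--     >>> remove_odd_indices([9, 8, 7, 6, 5, 4, 3], False)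
--     [8, 6, 4]
--     >>> remove_odd_indices([2], False)
--     []
--
--     """
--     "*** YOUR CODE HERE ***"
--     if not lst:
--         return lst      # same as returning an empty list
--     if odd:
--         return [lst[0]] + remove_odd_indices(lst[1:], not odd)
--     else:
--         return remove_odd_indices(lst[1:], not odd)
-- ===== SOURCE B (Python) =====
-- def remove_odd_indices(lst, odd):
--     if not lst:
--         return lst
--     return [x for i, x in enumerate(lst) if (i % 2 == 0) == odd]
-- ===== Notes on version B (the rewrite author's own statement) =====
-- stated objective: faster
-- what changed: Replaced the recursive slice-and-concat (which copies the tail and rebuilds lists at each level, O(n^2)) with a single O(n) indexed comprehension keeping elements whose index parity matches the flag.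
import Mathlib
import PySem

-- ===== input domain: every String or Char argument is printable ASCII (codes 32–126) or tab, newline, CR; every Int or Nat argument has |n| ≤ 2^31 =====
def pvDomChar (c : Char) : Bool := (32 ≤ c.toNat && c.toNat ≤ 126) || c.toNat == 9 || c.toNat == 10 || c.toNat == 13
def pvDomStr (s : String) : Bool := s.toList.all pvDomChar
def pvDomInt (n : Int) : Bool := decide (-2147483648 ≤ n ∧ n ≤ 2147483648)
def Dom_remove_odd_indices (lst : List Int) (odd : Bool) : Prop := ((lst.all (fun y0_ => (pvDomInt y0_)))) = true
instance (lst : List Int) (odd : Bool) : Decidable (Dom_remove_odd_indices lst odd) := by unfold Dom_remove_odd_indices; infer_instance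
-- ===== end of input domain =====

-- B replaces A's recursive slice-and-concat by a single indexed comprehension (simpler decomposition; same return value).


-- ===== PORT A =====
def remove_odd_indices (lst : List Int) (odd : Bool) : List Int :=
  match lst with
  | [] => lst                                   -- if not lst: return lst
  | x :: rest =>                                -- lst[0] = x, lst[1:] = rest
    if odd then [x] ++ remove_odd_indices rest (!odd)
    else remove_odd_indices rest (!odd)

-- ===== PORT B =====
def remove_odd_indices_alt (lst : List Int) (odd : Bool) : List Int :=
  match lst with
  | [] => lst                                   -- if not lst: return lst
  | _ :: _ =>                                   -- [x for i, x in enumerate(lst) if (i % 2 == 0) == odd]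
    ((PySem.List.enumerate lst 0).filter (fun p => (p.1 % 2 == 0) == odd)).map Prod.snd

-- ===== PRECONDITION & SPEC =====
def Spec_remove_odd_indices (lst : List Int) (odd : Bool) (out : List Int) : Prop := out = remove_odd_indices_alt lst odd
instance (lst : List Int) (odd : Bool) (out : List Int) : Decidable (Spec_remove_odd_indices lst odd out) := by unfold Spec_remove_odd_indices; infer_instance

-- ===== CLAIM (what is proved, stated in full; the proofs are below) =====
def Claim_equal_remove_odd_indices : Prop := ∀ (lst : List Int) (odd : Bool), Dom_remove_odd_indices lst odd → Spec_remove_odd_indices lst odd (remove_odd_indices lst odd)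

-- ===== LEMMAS AND PROOFS =====

theorem pv_aux (lst : List Int) : ∀ (s : Int) (odd : Bool), 0 ≤ s →
    ((PySem.List.enumerate lst s).filter (fun p => (p.1 % 2 == 0) == odd)).map Prod.snd
      = remove_odd_indices lst (((s % 2 == 0) : Bool) == odd) := by
  induction lst with
  | nil => intro s odd _; simp [PySem.List.enumerate_nil, remove_odd_indices]
  | cons x xs ih =>
    intro s odd hs
    rw [PySem.List.enumerate_cons]
    have h1 : (0:Int) ≤ s + 1 := by omega
    have hsm : s % 2 = 0 ∨ s % 2 = 1 := by omega
    rcases hsm with h | h <;>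
      rcases odd with _ | _ <;>
      simp [List.filter, remove_odd_indices, h] <;>
      first
        | (have h2 : (s+1) % 2 = 1 := by omega
           have hR := ih (s+1) false h1; simp [h2] at hR; exact hR)
        | (have h2 : (s+1) % 2 = 1 := by omega
           have hR := ih (s+1) true h1; simp [h2] at hR; exact hR)
        | (have h2 : (s+1) % 2 = 0 := by omega
           have hR := ih (s+1) false h1; simp [h2] at hR; exact hR)
        | (have h2 : (s+1) % 2 = 0 := by omega
           have hR := ih (s+1) true h1; simp [h2] at hR; exact hR)

-- ===== VERDICT (by name: the statement is the Claim_ definition above) =====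
theorem remove_odd_indices_spec : Claim_equal_remove_odd_indices := by
  intro lst odd _
  unfold Spec_remove_odd_indices remove_odd_indices_alt
  match lst with
  | [] => simp [remove_odd_indices]
  | x :: xs =>
    have := pv_aux (x :: xs) 0 odd (by omega)
    simpa using this.symm
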